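-- pv_equiv track=rewrite | github.com/dh7hong/algorithms-level-facebook | 170_ball-simulation.py | solution
-- ===== SOURCE A (Python) =====
-- def solution(n, m, x, y, queries):
--     # Initial possible range - only the final position
--     r1 = r2 = x
--     c1 = c2 = y
--
--     # Process queries in reverse order
--     for command, dx in reversed(queries):
--         if command == 0:  # original: move left -> reverse: move right
--             c2 = min(m - 1, c2 + dx)
--             if c1 != 0:
--                 c1 += dx
--         elif command == 1:  # original: move right -> reverse: move left
--             c1 = max(0, c1 - dx)
--             if c2 != m - 1:
--                 c2 -= dx
--         elif command == 2:  # original: move up -> reverse: move down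
--             r2 = min(n - 1, r2 + dx)
--             if r1 != 0:
--                 r1 += dx
--         elif command == 3:  # original: move down -> reverse: move up
--             r1 = max(0, r1 - dx)
--             if r2 != n - 1:
--                 r2 -= dx
--
--         # If the range is invalid, no possible starting point
--         if r1 > r2 or c1 > c2:
--             return 0
--
--     # Number of valid starting positions
--     return (r2 - r1 + 1) * (c2 - c1 + 1)
-- ===== SOURCE B (Python) =====
-- def _pass(L, ops, lo, hi):
--     # One-dimensional reverse simulation: ops in reverse query order,
--     # (True, dx) = expand-upwards command, (False, dx) = expand-downwards.
--     for expand, dx in ops: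
--         if expand:
--             hi = min(L - 1, hi + dx)
--             if lo != 0:
--                 lo += dx
--         else:
--             lo = max(0, lo - dx)
--             if hi != L - 1:
--                 hi -= dx
--         if lo > hi:
--             return None
--     return hi - lo + 1
--
--
-- def solution(n, m, x, y, queries):
--     col_ops = []
--     row_ops = []
--     for command, dx in reversed(queries):
--         if command == 0:
--             col_ops.append((True, dx))
--         elif command == 1:
--             col_ops.append((False, dx))
--         elif command == 2:
--             row_ops.append((True, dx))
--         elif command == 3:
--             row_ops.append((False, dx))
--     wc = _pass(m, col_ops, y, y)
--     if wc is None: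
--         return 0
--     wr = _pass(n, row_ops, x, x)
--     if wr is None:
--         return 0
--     return wr * wc
-- ===== Notes on version B (the rewrite author's own statement) =====
-- stated objective: alternative
-- what changed: B splits the single interleaved 4-branch reverse loop into two independent one-dimensional passes: it partitions the reversed queries into column ops and row ops (keeping order), runs a shared clamp/shift helper per axis with its own per-step invalidity check, and multiplies the two widths.
import Mathlib
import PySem

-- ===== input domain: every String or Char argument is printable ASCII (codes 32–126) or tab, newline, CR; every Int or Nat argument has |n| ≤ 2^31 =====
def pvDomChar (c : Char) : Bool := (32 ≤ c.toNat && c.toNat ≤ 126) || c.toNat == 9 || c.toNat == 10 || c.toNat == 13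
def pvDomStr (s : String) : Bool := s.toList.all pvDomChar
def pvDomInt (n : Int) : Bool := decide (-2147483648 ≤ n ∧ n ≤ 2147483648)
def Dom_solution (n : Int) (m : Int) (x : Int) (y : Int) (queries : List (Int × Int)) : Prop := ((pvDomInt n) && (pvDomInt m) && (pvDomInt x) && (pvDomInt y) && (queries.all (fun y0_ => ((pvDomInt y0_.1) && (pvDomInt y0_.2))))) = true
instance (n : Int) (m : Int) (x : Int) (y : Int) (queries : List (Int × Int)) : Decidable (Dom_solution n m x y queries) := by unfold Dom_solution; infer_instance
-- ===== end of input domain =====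

-- B replaces A's single interleaved 4-branch reverse loop by two independent
-- one-dimensional passes (columns, then rows) sharing one clamp/shift helper;
-- objective: alternative decomposition, same cost.

-- ===== PORT A =====
-- A's reverse loop; `none` models the early `return 0`.
def solA_loop (n : Int) (m : Int) : List (Int × Int) → Int → Int → Int → Int → Option (Int × Int × Int × Int)
  | [], r1, r2, c1, c2 => some (r1, r2, c1, c2)
  | (command, dx) :: rest, r1, r2, c1, c2 =>
    let s :=
      if command = 0 then (r1, r2, if c1 = 0 then c1 else c1 + dx, min (m - 1) (c2 + dx))
      else if command = 1 then (r1, r2, max 0 (c1 - dx), if c2 = m - 1 then c2 else c2 - dx)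
      else if command = 2 then (if r1 = 0 then r1 else r1 + dx, min (n - 1) (r2 + dx), c1, c2)
      else if command = 3 then (max 0 (r1 - dx), if r2 = n - 1 then r2 else r2 - dx, c1, c2)
      else (r1, r2, c1, c2)
    if s.1 > s.2.1 ∨ s.2.2.1 > s.2.2.2 then none
    else solA_loop n m rest s.1 s.2.1 s.2.2.1 s.2.2.2

def solution (n : Int) (m : Int) (x : Int) (y : Int) (queries : List (Int × Int)) : Int :=
  match solA_loop n m queries.reverse x x y y with
  | none => 0
  | some (r1, r2, c1, c2) => (r2 - r1 + 1) * (c2 - c1 + 1)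

-- ===== PORT B =====
-- B's shared one-dimensional pass: `none` models Python's None (invalid interval).
def pass1d (L : Int) : List (Bool × Int) → Int → Int → Option Int
  | [], lo, hi => some (hi - lo + 1)
  | (expand, dx) :: rest, lo, hi =>
    let hi' := if expand then min (L - 1) (hi + dx) else (if hi = L - 1 then hi else hi - dx)
    let lo' := if expand then (if lo = 0 then lo else lo + dx) else max 0 (lo - dx)
    if lo' > hi' then none else pass1d L rest lo' hi'

def colOps : List (Int × Int) → List (Bool × Int)
  | [] => []
  | (c, dx) :: rest =>
    if c = 0 then (true, dx) :: colOps rest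
    else if c = 1 then (false, dx) :: colOps rest
    else colOps rest

def rowOps : List (Int × Int) → List (Bool × Int)
  | [] => []
  | (c, dx) :: rest =>
    if c = 2 then (true, dx) :: rowOps rest
    else if c = 3 then (false, dx) :: rowOps rest
    else rowOps rest

def solution_alt (n : Int) (m : Int) (x : Int) (y : Int) (queries : List (Int × Int)) : Int :=
  let rev := queries.reverse
  match pass1d m (colOps rev) y y with
  | none => 0
  | some wc =>
    match pass1d n (rowOps rev) x x with
    | none => 0
    | some wr => wr * wc

-- ===== PRECONDITION & SPEC =====
def Spec_solution (n : Int) (m : Int) (x : Int) (y : Int) (queries : List (Int × Int)) (out : Int) : Prop := out = solution_alt n m x y queries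
instance (n : Int) (m : Int) (x : Int) (y : Int) (queries : List (Int × Int)) (out : Int) : Decidable (Spec_solution n m x y queries out) := by unfold Spec_solution; infer_instance

-- ===== CLAIM (what is proved, stated in full; the proofs are below) =====
def Claim_equal_solution : Prop := ∀ (n : Int) (m : Int) (x : Int) (y : Int) (queries : List (Int × Int)), Dom_solution n m x y queries → Spec_solution n m x y queries (solution n m x y queries)

-- ===== LEMMAS AND PROOFS =====

-- Key invariant: on a valid state the interleaved loop computes the product of
-- the two independent one-dimensional passes.
lemma loop_split (n m : Int) (qs : List (Int × Int)) :
    ∀ r1 r2 c1 c2 : Int, r1 ≤ r2 → c1 ≤ c2 →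
    (match solA_loop n m qs r1 r2 c1 c2 with
     | none => (0 : Int)
     | some (a, b, c, d) => (b - a + 1) * (d - c + 1))
    = (match pass1d m (colOps qs) c1 c2 with
       | none => (0 : Int)
       | some wc =>
         match pass1d n (rowOps qs) r1 r2 with
         | none => 0
         | some wr => wr * wc) := by
  induction qs with
  | nil =>
    intro r1 r2 c1 c2 _ _
    simp [solA_loop, colOps, rowOps, pass1d]
  | cons q rest ih =>
    obtain ⟨command, dx⟩ := q
    intro r1 r2 c1 c2 hr hc
    by_cases h0 : command = 0
    · subst h0
      have e1 : solA_loop n m ((0, dx) :: rest) r1 r2 c1 c2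
          = if r1 > r2 ∨ (if c1 = 0 then c1 else c1 + dx) > min (m - 1) (c2 + dx) then none
            else solA_loop n m rest r1 r2 (if c1 = 0 then c1 else c1 + dx) (min (m - 1) (c2 + dx)) := rfl
      have e2 : colOps ((0, dx) :: rest) = (true, dx) :: colOps rest := rfl
      have e3 : rowOps ((0, dx) :: rest) = rowOps rest := rfl
      have e4 : pass1d m ((true, dx) :: colOps rest) c1 c2
          = if (if c1 = 0 then c1 else c1 + dx) > min (m - 1) (c2 + dx) then none
            else pass1d m (colOps rest) (if c1 = 0 then c1 else c1 + dx) (min (m - 1) (c2 + dx)) := rfl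
      rw [e1, e2, e3, e4]
      set c1' := (if c1 = 0 then c1 else c1 + dx) with hc1'
      set c2' := min (m - 1) (c2 + dx) with hc2'
      by_cases hinv : c1' > c2'
      · rw [if_pos (Or.inr hinv), if_pos hinv]
      · rw [if_neg (not_or.mpr ⟨not_lt.mpr hr, hinv⟩), if_neg hinv]
        exact ih r1 r2 c1' c2' hr (not_lt.mp hinv)
    · by_cases h1 : command = 1
      · subst h1
        have e1 : solA_loop n m ((1, dx) :: rest) r1 r2 c1 c2
            = if r1 > r2 ∨ max 0 (c1 - dx) > (if c2 = m - 1 then c2 else c2 - dx) then none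
              else solA_loop n m rest r1 r2 (max 0 (c1 - dx)) (if c2 = m - 1 then c2 else c2 - dx) := rfl
        have e2 : colOps ((1, dx) :: rest) = (false, dx) :: colOps rest := rfl
        have e3 : rowOps ((1, dx) :: rest) = rowOps rest := rfl
        have e4 : pass1d m ((false, dx) :: colOps rest) c1 c2
            = if max 0 (c1 - dx) > (if c2 = m - 1 then c2 else c2 - dx) then none
              else pass1d m (colOps rest) (max 0 (c1 - dx)) (if c2 = m - 1 then c2 else c2 - dx) := rfl
        rw [e1, e2, e3, e4]
        set c1' := max 0 (c1 - dx) with hc1'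
        set c2' := (if c2 = m - 1 then c2 else c2 - dx) with hc2'
        by_cases hinv : c1' > c2'
        · rw [if_pos (Or.inr hinv), if_pos hinv]
        · rw [if_neg (not_or.mpr ⟨not_lt.mpr hr, hinv⟩), if_neg hinv]
          exact ih r1 r2 c1' c2' hr (not_lt.mp hinv)
      · by_cases h2 : command = 2
        · subst h2
          have e1 : solA_loop n m ((2, dx) :: rest) r1 r2 c1 c2
              = if (if r1 = 0 then r1 else r1 + dx) > min (n - 1) (r2 + dx) ∨ c1 > c2 then none
                else solA_loop n m rest (if r1 = 0 then r1 else r1 + dx) (min (n - 1) (r2 + dx)) c1 c2 := rfl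
          have e2 : colOps ((2, dx) :: rest) = colOps rest := rfl
          have e3 : rowOps ((2, dx) :: rest) = (true, dx) :: rowOps rest := rfl
          have e4 : pass1d n ((true, dx) :: rowOps rest) r1 r2
              = if (if r1 = 0 then r1 else r1 + dx) > min (n - 1) (r2 + dx) then none
                else pass1d n (rowOps rest) (if r1 = 0 then r1 else r1 + dx) (min (n - 1) (r2 + dx)) := rfl
          rw [e1, e2, e3, e4]
          set r1' := (if r1 = 0 then r1 else r1 + dx) with hr1'
          set r2' := min (n - 1) (r2 + dx) with hr2'
          by_cases hinv : r1' > r2'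
          · rw [if_pos (Or.inl hinv), if_pos hinv]
            cases pass1d m (colOps rest) c1 c2 <;> rfl
          · rw [if_neg (not_or.mpr ⟨hinv, not_lt.mpr hc⟩), if_neg hinv]
            exact ih r1' r2' c1 c2 (not_lt.mp hinv) hc
        · by_cases h3 : command = 3
          · subst h3
            have e1 : solA_loop n m ((3, dx) :: rest) r1 r2 c1 c2
                = if max 0 (r1 - dx) > (if r2 = n - 1 then r2 else r2 - dx) ∨ c1 > c2 then none
                  else solA_loop n m rest (max 0 (r1 - dx)) (if r2 = n - 1 then r2 else r2 - dx) c1 c2 := rfl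
            have e2 : colOps ((3, dx) :: rest) = colOps rest := rfl
            have e3 : rowOps ((3, dx) :: rest) = (false, dx) :: rowOps rest := rfl
            have e4 : pass1d n ((false, dx) :: rowOps rest) r1 r2
                = if max 0 (r1 - dx) > (if r2 = n - 1 then r2 else r2 - dx) then none
                  else pass1d n (rowOps rest) (max 0 (r1 - dx)) (if r2 = n - 1 then r2 else r2 - dx) := rfl
            rw [e1, e2, e3, e4]
            set r1' := max 0 (r1 - dx) with hr1'
            set r2' := (if r2 = n - 1 then r2 else r2 - dx) with hr2'
            by_cases hinv : r1' > r2'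
            · rw [if_pos (Or.inl hinv), if_pos hinv]
              cases pass1d m (colOps rest) c1 c2 <;> rfl
            · rw [if_neg (not_or.mpr ⟨hinv, not_lt.mpr hc⟩), if_neg hinv]
              exact ih r1' r2' c1 c2 (not_lt.mp hinv) hc
          · have e1 : solA_loop n m ((command, dx) :: rest) r1 r2 c1 c2
                = if r1 > r2 ∨ c1 > c2 then none else solA_loop n m rest r1 r2 c1 c2 := by
              simp only [solA_loop, if_neg h0, if_neg h1, if_neg h2, if_neg h3]
            have e2 : colOps ((command, dx) :: rest) = colOps rest := by
              simp only [colOps, if_neg h0, if_neg h1]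
            have e3 : rowOps ((command, dx) :: rest) = rowOps rest := by
              simp only [rowOps, if_neg h2, if_neg h3]
            rw [e1, e2, e3, if_neg (not_or.mpr ⟨not_lt.mpr hr, not_lt.mpr hc⟩)]
            exact ih r1 r2 c1 c2 hr hc

-- ===== VERDICT (by name: the statement is the Claim_ definition above) =====
theorem solution_spec : Claim_equal_solution := by
  intro n m x y queries _
  unfold Spec_solution solution solution_alt
  have h := loop_split n m queries.reverse x x y y le_rfl le_rfl
  cases hA : solA_loop n m queries.reverse x x y y with
  | none => simpa [hA] using h
  | some s => obtain ⟨a, b, c, d⟩ := s; simpa [hA] using h
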